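/- GENERATED by mk_final_copies.py from the proof of the farm's unit `vorbis_init` (farm:vorbis_init.1: Proof.lean) as the
   re-elaboration sweep compiled it — do not edit. -/
import Asan.CheckWalk
import Vorbis.Spec.Units.vorbis_init

open X86 X86.User Asan Vorbis

set_option maxRecDepth 4000
set_option maxHeartbeats 4000000

namespace Vorbis.Spec.vorbis_init

/-- 0x108036, `movups [rbx+0x70], xmm0` (stb_vorbis_fixed.c:4309): the second instruction of the struct copy, five bytes after
the return of `__asan_load16_noabort`. The walk stops here so that the value in xmm0 can be named. -/
def cutCopy : Nat := Vorbis.L.vorbis_init.ret3.toNat + 5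

/-- Byte `j` of a little-endian read is the byte at offset `j`. -/
theorem readLE_byte (f : Mem) (a : Word) (n j : Nat) (hj : j < n) :
    UInt8.ofNat (f.readLE a n / 256 ^ j % 256) = f.read (a + UInt64.ofNat j) := by
  induction n generalizing a j with
  | zero => omega
  | succ n ih =>
    simp only [Mem.readLE]
    have hlt := (f.read a).toNat_lt
    cases j with
    | zero =>
      simp only [Nat.pow_zero, Nat.div_one, UInt64.reduceOfNat, UInt64.add_zero]
      rw [Nat.add_mul_mod_self_left, Nat.mod_eq_of_lt (by omega)]
      exact UInt8.ofNat_toNat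
    | succ j =>
      rw [← Mem.add_ofNat_succ, ← ih (a + 1) j (by omega)]
      have e : ((f.read a).toNat + 256 * f.readLE (a + 1) n) / 256 ^ (j + 1) = f.readLE (a + 1) n / 256 ^ j := by
        rw [Nat.pow_succ, Nat.mul_comm (256 ^ j) 256, ← Nat.div_div_eq_div_mul]
        have e' : ((f.read a).toNat + 256 * f.readLE (a + 1) n) / 256 = f.readLE (a + 1) n := by
          omega
        rw [e']
      rw [e]

/-- `off + i` as an address offset. -/
theorem add_off (a : Word) (off i : Nat) : a + UInt64.ofNat off + UInt64.ofNat i = a + UInt64.ofNat (off + i) := by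
  rw [UInt64.ofNat_add, UInt64.add_assoc]

/-- **A part of a copied range**: after `writeLE a n (readLE b n)` (the struct copy), the `k` bytes at offset `off` of the target
are the `k` bytes at offset `off` of the source. -/
theorem readLE_copy_part (f g : Mem) (a b : Word) (n off k : Nat) (hn : n ≤ 2 ^ 64) (h : off + k ≤ n) :
    (g.writeLE a n (f.readLE b n)).readLE (a + UInt64.ofNat off) k = f.readLE (b + UInt64.ofNat off) k := by
  have e1 : (g.writeLE a n (f.readLE b n)).readLE (a + UInt64.ofNat off) k = (f.readLE b n / 256 ^ off) % 256 ^ k := by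
    apply Vorbis.readLE_of_wordBytes
    intro i hi
    rw [add_off, Mem.read_writeLE_in _ _ _ _ hn _ (by omega)]
    unfold Vorbis.wordByte
    rw [Nat.div_div_eq_div_mul, Nat.pow_add]
  have e2 : f.readLE (b + UInt64.ofNat off) k = (f.readLE b n / 256 ^ off) % 256 ^ k := by
    apply Vorbis.readLE_of_wordBytes
    intro i hi
    rw [add_off, ← readLE_byte f b n (off + i) (by omega)]
    unfold Vorbis.wordByte
    rw [Nat.div_div_eq_div_mul, Nat.pow_add]
  rw [e1, e2]

/-- **A zero range survives a store** that stores 0 or lies off the range. -/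
theorem zeroRange_store {mem : Mem} {a lo hi : Nat} (h : ZeroRange mem a lo hi) (b : Word) (n v : Nat)
    (hb : b.toNat + n ≤ 2 ^ 64) (ha : a + hi ≤ 2 ^ 64) (hd : v = 0 ∨ b.toNat + n ≤ a + lo ∨ a + hi ≤ b.toNat) :
    ZeroRange (mem.writeLE b n v) a lo hi := by
  intro o h1 h2
  rcases hd with hv | hd
  · subst hv
    by_cases hc : ∃ i, i < n ∧ b + UInt64.ofNat i = addr (a + o)
    · obtain ⟨i, hi, e⟩ := hc
      rw [← e, Mem.read_writeLE_in _ _ _ _ (by omega) i hi]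
      simp only [Nat.zero_div, Nat.zero_mod]
      rfl
    · have hout : ∀ i, i < n → b + UInt64.ofNat i ≠ addr (a + o) := by
        intro i hi e
        exact hc ⟨i, hi, e⟩
      rw [Mem.read_writeLE_other _ _ _ _ _ hout]
      exact h o h1 h2
  · have e := toNat_addr (a + o) (by omega)
    rw [Mem.read_writeLE_disjoint_noWrap _ _ _ _ _ hb (by omega)]
    exact h o h1 h2

/-- `x & ~7` as a number: `x` rounded down to a multiple of 8. -/
theorem and_not7 (x : BitVec 32) : (x &&& 0xFFFFFFF8#32).toNat = x.toNat / 8 * 8 := by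
  have e : x &&& 0xFFFFFFF8#32 = (x / 8#32) * 8#32 := by
    bv_decide
  rw [e, BitVec.toNat_mul, BitVec.toNat_udiv]
  have := x.isLt
  simp only [BitVec.toNat_ofNat, Nat.reducePow, Nat.reduceMod]
  omega

/-- The number `movups [rbx+0x70], xmm0` stores after `movdqu xmm0, [rbp]` loaded it: the 16 bytes read. `h` is the walker's
`w_zmm` after the load (the vector registers of `s` are those of a 128-bit write of the bytes into xmm0). -/
theorem copied_value (s t : State) (f : Mem) (a : Word)
    (h : s.zmm = (t.writeVecLow .v128 0 (BitVec.ofNat 512 (f.readLE a 16))).zmm) :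
    ((s.readVec .v128 0).trunc 128).toNat = f.readLE a 16 := by
  have e : s.readVec .v128 0 = (t.writeVecLow .v128 0 (BitVec.ofNat 512 (f.readLE a 16))).readVec .v128 0 := by
    unfold State.readVec
    rw [h]
  rw [e, X86.Sem.readVec_writeVecLow, X86.Sem.trunc128_idem, X86.Sem.trunc128_ofNat_readLE]

/-- **The memory half of the post**: from the memory after the struct copy (`m0`: zero outside `alloc`) and the seven stores of
the rest of the function (with the return addresses of the check calls in between), `H0` and AR5 of the fresh arena. -/
theorem post_fields (m0 m : Mem) (p sp : Word) (B len v r1 r2 r3 r4 r5 r6 r7 : Nat)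
    (hp0 : 1154368 ≤ p.toNat) (hp : p.toNat + 1808 ≤ 12582912)
    (hsp1 : 7340032 + 96 ≤ sp.toNat) (hsp2 : sp.toNat + 8 ≤ 8388608)
    (hoff : sp.toNat + 8 ≤ p.toNat ∨ p.toNat + 1808 ≤ 7340032 ∨ 8388608 ≤ p.toNat)
    (hzA : ZeroRange m0 p.toNat 0 112) (hzB : ZeroRange m0 p.toNat 128 1808)
    (hm : m = (((((((((((((m0.writeLE (sp - 32) 8 r1).writeLE (p + 120) 4 v).writeLE (sp - 32) 8 r2).writeLE (p + 132) 4
      v).writeLE (sp - 32) 8 r3).writeLE (p + 136) 4 0).writeLE (sp - 32) 8 r4).writeLE (p + 140) 4 0).writeLE (sp - 32) 8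
      r5).writeLE (p + 48) 8 0).writeLE (sp - 32) 8 r6).writeLE (p + 168) 8 0).writeLE (sp - 32) 8 r7).writeLE (p + 1792) 4
      4294967295)
    (f112 : m.readLE (p + 112) 8 = B) (f120 : m.readLE (p + 120) 4 = len / 8 * 8) (f132 : m.readLE (p + 132) 4 = len / 8 * 8)
    (f1792 : m.readLE (p + 1792) 4 = 4294967295) (hL : len / 8 * 8 ≤ 12582912) :
    H0 m p.toNat ∧ ArenaFields ⟨B, len / 8 * 8, 0, len / 8 * 8, [], []⟩ m p.toNat := by
  -- the zero ranges of the final memory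
  have hz : ∀ lo hi, ((lo = 0 ∧ hi = 112) ∨ (lo = 128 ∧ hi = 132) ∨ (lo = 136 ∧ hi = 1792) ∨ (lo = 1796 ∧ hi = 1808)) →
      ZeroRange m p.toNat lo hi := by
    intro lo hi hr
    have hbase : ZeroRange m0 p.toNat lo hi := by
      rcases hr with ⟨h1, h2⟩ | ⟨h1, h2⟩ | ⟨h1, h2⟩ | ⟨h1, h2⟩
      · subst h1 h2
        exact hzA
      · subst h1 h2
        exact hzB.mono (by omega) (by omega)
      · subst h1 h2
        exact hzB.mono (by omega) (by omega)
      · subst h1 h2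
        exact hzB.mono (by omega) (by omega)
    rw [hm]
    repeat
      (refine zeroRange_store ?_ _ _ _ ?_ ?_ ?_
       rotate_left
       · u_omega
       · u_omega
       · first
         | exact Or.inl rfl
         | (right
            u_omega))
    exact hbase
  -- the typed reads of the four fields
  have hw : p.toNat + 1808 ≤ 2 ^ 64 := by omega
  have hL31 : len / 8 * 8 < 2147483648 := by omega
  have e112 : m.ptr (p.toNat + 112) = B := by
    rw [Mem.ptr_eq]
    unfold Mem.u64
    rw [← Vorbis.addr_add_lit, Vorbis.addr_toNat]
    exact f112
  have e120 : m.i32 (p.toNat + 120) = ((len / 8 * 8 : Nat) : Int) := by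
    rw [Mem.i32_of_u32_lt]
    all_goals unfold Mem.u32
    all_goals rw [← Vorbis.addr_add_lit, Vorbis.addr_toNat, f120]
    exact hL31
  have e132 : m.i32 (p.toNat + 132) = ((len / 8 * 8 : Nat) : Int) := by
    rw [Mem.i32_of_u32_lt]
    all_goals unfold Mem.u32
    all_goals rw [← Vorbis.addr_add_lit, Vorbis.addr_toNat, f132]
    exact hL31
  have e1792 : m.i32 (p.toNat + 1792) = -1 := by
    rw [Mem.i32_def]
    unfold Mem.u32
    rw [← Vorbis.addr_add_lit, Vorbis.addr_toNat, f1792]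
    decide
  have e128 : m.i32 (p.toNat + 128) = 0 := (hz 128 132 (by omega)).i32 128 (by omega) (by omega)
  constructor
  · refine ⟨?_, ?_, ?_, ?_, ?_, ?_⟩
    · simp only [voff]
      exact hz 0 112 (by omega)
    · simp only [voff]
      exact hz 128 132 (by omega)
    · simp only [voff]
      exact hz 136 1792 (by omega)
    · simp only [voff]
      exact hz 1796 1808 (by omega)
    · simp only [vacc, voff]
      rw [e120, e132]
    · simp only [vacc, voff]
      exact e1792
  · refine ⟨?_, ?_, ?_, ?_⟩
    · simp only [vacc, voff]
      exact e112
    · simp only [vacc, voff]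
      exact e120
    · simp only [vacc, voff]
      exact e128
    · simp only [vacc, voff]
      exact e132

end Vorbis.Spec.vorbis_init

/-- `vorbis_init(p, z)` satisfies its contract. Five walks: entry → `memset(p, 0, 1808)` → `__asan_store16_noabort` →
`__asan_load16_noabort` (three contract calls: after each, the stack slots, the two words of `*z`, the zero bytes of `*p`, the
shadow and the footprint are carried over the callee's footprint) → the struct copy `movdqu` / `movups` with the EXACT SSE rules
(cut between the two at `cutCopy`, so that the value in xmm0 is named: `copied_value`) → the seven checked field stores to the
`ret`. The `z == NULL` arm of 0x10801e is pruned (`*z` is live, so `z ≠ 0`). The post is `post_fields` + `ArenaOK.init`. -/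
theorem Vorbis.Spec.Worked.vorbis_init_ok : Vorbis.Spec.vorbis_init.Statement := by
  intro Lay hLay μ hμ u₀ hcode h_memset h_store16 h_load16 h_load4 h_store4 h_store8 others frames B len u ret he hpre
  v_entry he
  obtain ⟨hsh, hlp, hlz, hdisj, hB, hlen, hAR1, hAR1x, hout⟩ := hpre
  have hms := h_memset others frames
  have hsp := hsh.rsp
  have hwp := hlp.where_ hsh.inv hsh.offText (by decide)
  have hwz := hlz.where_ hsh.inv hsh.offText (by decide)
  simp only [Vorbis.Off.sizeof.stb_vorbis, Vorbis.Off.sizeof.stb_vorbis_alloc] at hwp hwz hdisj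
  u_walk hcode [hμ.vendor] span [Vorbis.L.textLo, Vorbis.L.textHi] side (v_side)
  case call_inv => v_inv
  case pre_108016 =>
    -- memset(p, 0, 1808): the shadow clause and `Live(p, 1808)`
    have c_rdi : s_108016.reg .rdi = u.reg .rdi := w_kept.get .rdi rfl
    refine ⟨?_, Or.inr ?_⟩
    · refine hsh.callee ?_ ?_ ?_ ?_
      · v_untouched
      · rw [w_rsp]
        u_omega
      · rw [w_rsp]
        u_omega
      · rw [w_rsp]
        u_omega
    · rw [c_rdi, w_rdx]
      exact hlp
  -- 0x10801b, stb_vorbis_fixed.c:4308: after memset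
  v_after_call w_rsp_108016 w_mem_108016
  have c_rdi : s_108016.reg .rdi = u.reg .rdi := w_kept_108016.get .rdi rfl
  have e1808 : (Word.ofBV 1808#32).toNat = 1808 := by decide
  have e0 : (Word.ofBV 0#32).toNat % 256 = 0 := by decide
  rw [c_rdi, w_rdx_108016, e1808] at w_same
  obtain ⟨-, hun1, hfill⟩ := w_post
  rw [c_rdi, w_rdx_108016, w_rsi_108016, e1808, e0] at hfill
  -- what the rest needs of the memory after memset
  have hs0 : UInt64.ofNat (s_108016r.mem.readLE (u.reg .rsp) 8) = ret := by
    u_frame he_retAddr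
  have hp1 : UInt64.ofNat (s_108016.mem.readLE (u.reg .rsp - 8) 8) = u.reg .rbp := by
    u_resolve
  have hp2 : UInt64.ofNat (s_108016.mem.readLE (u.reg .rsp - 16) 8) = u.reg .rbx := by
    u_resolve
  rw [w_mem_108016] at hp1 hp2
  have hs1 : UInt64.ofNat (s_108016r.mem.readLE (u.reg .rsp - 8) 8) = u.reg .rbp := by
    u_frame hp1
  have hs2 : UInt64.ofNat (s_108016r.mem.readLE (u.reg .rsp - 16) 8) = u.reg .rbx := by
    u_frame hp2
  have hun : ShadowUntouched u.mem s_108016r.mem := by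
    v_untouched
  have hsame : Mem.SameExcept [⟨(u.reg .rsp).toNat - 96, (u.reg .rsp).toNat⟩,
      ⟨(u.reg .rdi).toNat, (u.reg .rdi).toNat + 1808⟩] u.mem s_108016r.mem := by
    u_same
  -- the two words of `*z` (off memset's footprint), and the 1808 zero bytes of `*p`
  have rB0 : u.mem.readLE (u.reg .rsi) 8 = B := by
    rw [← hB]
    unfold Mem.u64
    rw [Vorbis.addr_toNat]
  have rlen0 : u.mem.readLE (u.reg .rsi + 8) 4 = len := by
    rw [← hlen]
    unfold Mem.u32
    rw [← Vorbis.addr_add_lit, Vorbis.addr_toNat]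
  have rB1 : s_108016r.mem.readLE (u.reg .rsi) 8 = B := by
    u_frame rB0
  have rlen1 : s_108016r.mem.readLE (u.reg .rsi + 8) 4 = len := by
    u_frame rlen0
  have hz1 : ZeroRange s_108016r.mem (u.reg .rdi).toNat 0 1808 := by
    intro o _ ho
    have h1 := hfill o ho
    rw [Mem.readLE_one] at h1
    rw [← Vorbis.addr_add, Vorbis.addr_toNat]
    exact UInt8.toNat_inj.mp h1
  clear hfill hp1 hp2 w_same hun1 c_rdi e1808 e0
  -- `z ≠ NULL`: the `je` at 0x10801e is not taken (the walker prunes that arm with this fact)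
  have hznz : 1154368 ≤ (u.reg .rsi).toNat := hwz.1
  u_walk hcode [hμ.vendor] span [Vorbis.L.textLo, Vorbis.L.textHi] side (v_side)
  case call_inv => v_inv
  case pre_108024 =>
    -- 0x108024, stb_vorbis_fixed.c:4309: the 16 bytes of `p->alloc` lie inside `*p`
    show Accessible s_108024.mem (s_108024.reg .rdi).toNat 16
    have hun' : ShadowUntouched u.mem s_108024.mem := by v_untouched
    refine hlp.accessible hsh.inv hun' _ 16 (by decide) ?_ ?_
    · rw [w_rdi]
      u_omega
    · rw [w_rdi]
      simp only [Vorbis.Off.sizeof.stb_vorbis]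
      u_omega
  -- 0x108029: after `__asan_store16_noabort`
  v_after_call w_rsp_108024 w_mem_108024
  have hs0' : UInt64.ofNat (s_108024r.mem.readLE (u.reg .rsp) 8) = ret := by
    u_frame hs0
  have hs1' : UInt64.ofNat (s_108024r.mem.readLE (u.reg .rsp - 8) 8) = u.reg .rbp := by
    u_frame hs1
  have hs2' : UInt64.ofNat (s_108024r.mem.readLE (u.reg .rsp - 16) 8) = u.reg .rbx := by
    u_frame hs2
  have rB2 : s_108024r.mem.readLE (u.reg .rsi) 8 = B := by
    u_frame rB1
  have rlen2 : s_108024r.mem.readLE (u.reg .rsi + 8) 4 = len := by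
    u_frame rlen1
  have hz2 : ZeroRange s_108024r.mem (u.reg .rdi).toNat 0 1808 := by
    refine hz1.frame ?_ (by u_omega)
    u_eqon
  have hun2 : ShadowUntouched u.mem s_108024r.mem := by
    v_untouched
  have hsame2 : Mem.SameExcept [⟨(u.reg .rsp).toNat - 96, (u.reg .rsp).toNat⟩,
      ⟨(u.reg .rdi).toNat, (u.reg .rdi).toNat + 1808⟩] u.mem s_108024r.mem := by
    u_same
  clear hs0 hs1 hs2 rB1 rlen1 hz1 hun hsame w_same w_post w_code w_inv
  clear w_mem_108024 w_kept_108024 w_rdi_108024 w_rbp_108024 w_rbx_108024 w_rsp_108024 w_mxcsr_108024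
  u_walk hcode [hμ.vendor] span [Vorbis.L.textLo, Vorbis.L.textHi] side (v_side)
  case call_inv => v_inv
  case pre_10802c =>
    -- 0x10802c, stb_vorbis_fixed.c:4309: the 16 bytes of `*z`
    show Accessible s_10802c.mem (s_10802c.reg .rdi).toNat 16
    have hun' : ShadowUntouched u.mem s_10802c.mem := by v_untouched
    refine hlz.accessible hsh.inv hun' _ 16 (by decide) ?_ ?_
    · rw [w_rdi]
      u_omega
    · rw [w_rdi]
      simp only [Vorbis.Off.sizeof.stb_vorbis_alloc]
      u_omega
  -- 0x108031: after `__asan_load16_noabort`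
  v_after_call w_rsp_10802c w_mem_10802c
  have hs0 : UInt64.ofNat (s_10802cr.mem.readLE (u.reg .rsp) 8) = ret := by
    u_frame hs0'
  have hs1 : UInt64.ofNat (s_10802cr.mem.readLE (u.reg .rsp - 8) 8) = u.reg .rbp := by
    u_frame hs1'
  have hs2 : UInt64.ofNat (s_10802cr.mem.readLE (u.reg .rsp - 16) 8) = u.reg .rbx := by
    u_frame hs2'
  have rB3 : s_10802cr.mem.readLE (u.reg .rsi) 8 = B := by
    u_frame rB2
  have rlen3 : s_10802cr.mem.readLE (u.reg .rsi + 8) 4 = len := by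
    u_frame rlen2
  have hz3 : ZeroRange s_10802cr.mem (u.reg .rdi).toNat 0 1808 := by
    refine hz2.frame ?_ (by u_omega)
    u_eqon
  have hun3 : ShadowUntouched u.mem s_10802cr.mem := by
    v_untouched
  have hsame3 : Mem.SameExcept [⟨(u.reg .rsp).toNat - 96, (u.reg .rsp).toNat⟩,
      ⟨(u.reg .rdi).toNat, (u.reg .rdi).toNat + 1808⟩] u.mem s_10802cr.mem := by
    u_same
  clear hs0' hs1' hs2' rB2 rlen2 hz2 hun2 hsame2 w_same w_post w_code w_inv
  clear w_mem_10802c w_kept_10802c w_rdi_10802c w_rbp_10802c w_rbx_10802c w_rsp_10802c w_mxcsr_10802c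
  have hzmm : s_10802cr.zmm = s_10802cr.zmm := rfl
  u_exact_sse (u_walk hcode [hμ.vendor] until [Vorbis.Spec.vorbis_init.cutCopy] span [Vorbis.L.textLo, Vorbis.L.textHi] side (v_side))
  -- the value in xmm0: the 16 bytes of `*z`
  have hv := Vorbis.Spec.vorbis_init.copied_value s_108031 s_10802cr _ _ w_zmm
  u_exact_sse (u_walk hcode [hμ.vendor] until [Vorbis.L.vorbis_init.chk3] span [Vorbis.L.textLo, Vorbis.L.textHi] side (v_side))
  -- 0x10803a, stb_vorbis_fixed.c:4310: after the struct copy. What the rest needs of this memory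
  rw [hv] at w_mem
  have r112 : s_10803a.mem.readLE (u.reg .rdi + 112) 8 = B := by
    rw [w_mem]
    have h := Vorbis.Spec.vorbis_init.readLE_copy_part s_10802cr.mem s_10802cr.mem (u.reg .rdi + 112) (u.reg .rsi) 16 0 8
      (by decide) (by decide)
    simp only [UInt64.reduceOfNat, UInt64.add_zero] at h
    rw [h]
    exact rB3
  have r120 : s_10803a.mem.readLE (u.reg .rdi + 120) 4 = len := by
    rw [w_mem]
    have e : u.reg .rdi + 120 = u.reg .rdi + 112 + UInt64.ofNat 8 := by
      rw [UInt64.add_assoc]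
      rfl
    have h := Vorbis.Spec.vorbis_init.readLE_copy_part s_10802cr.mem s_10802cr.mem (u.reg .rdi + 112) (u.reg .rsi) 16 8 4
      (by decide) (by decide)
    simp only [UInt64.reduceOfNat] at h
    rw [e]
    simp only [UInt64.reduceOfNat]
    rw [h]
    exact rlen3
  have hzA : ZeroRange s_10803a.mem (u.reg .rdi).toNat 0 112 := by
    rw [w_mem]
    exact Vorbis.Spec.vorbis_init.zeroRange_store (hz3.mono (by omega) (by omega)) _ _ _ (by u_omega) (by u_omega)
      (Or.inr (by u_omega))
  have hzB : ZeroRange s_10803a.mem (u.reg .rdi).toNat 128 1808 := by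
    rw [w_mem]
    exact Vorbis.Spec.vorbis_init.zeroRange_store (hz3.mono (by omega) (by omega)) _ _ _ (by u_omega) (by u_omega)
      (Or.inr (by u_omega))
  have hs0' : UInt64.ofNat (s_10803a.mem.readLE (u.reg .rsp) 8) = ret := by
    u_frame hs0
  have hs1' : UInt64.ofNat (s_10803a.mem.readLE (u.reg .rsp - 8) 8) = u.reg .rbp := by
    u_frame hs1
  have hs2' : UInt64.ofNat (s_10803a.mem.readLE (u.reg .rsp - 16) 8) = u.reg .rbx := by
    u_frame hs2
  have hun4 : ShadowUntouched u.mem s_10803a.mem := by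
    v_untouched
  have hsame4 : Mem.SameExcept [⟨(u.reg .rsp).toNat - 96, (u.reg .rsp).toNat⟩,
      ⟨(u.reg .rdi).toNat, (u.reg .rdi).toNat + 1808⟩] u.mem s_10803a.mem := by
    u_same
  have hdf : s_10803a.flags .df = false := by
    rw [w_flags]
    exact w_df
  have hmx : s_10803a.mxcsr &&& 8064 = 8064 := by
    rw [w_mxcsr]
    exact w_mx
  clear w_mem hzmm hv hs0 hs1 hs2 rB3 rlen3 hz3 hun3 hsame3 w_flags w_mxcsr
  try clear w_zmm
  u_walk hcode [hμ.vendor] span [Vorbis.L.textLo, Vorbis.L.textHi] side (v_side)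
  case check_10803e =>
    -- 0x10803e, stb_vorbis_fixed.c:4310: the load of `p->alloc.alloc_buffer_length_in_bytes`: inside `*p`
    have hun' : ShadowUntouched u.mem s_10803e.mem := by v_untouched
    refine hlp.accSmall hsh.inv hun' _ 4 (by decide) (by u_omega) ?_
    simp only [Vorbis.Off.sizeof.stb_vorbis]
    u_omega
  case check_108053 =>
    -- 0x108053, stb_vorbis_fixed.c:4311: the store of `p->temp_offset`: inside `*p`
    have hun' : ShadowUntouched u.mem s_108053.mem := by v_untouched
    refine hlp.accSmall hsh.inv hun' _ 4 (by decide) (by u_omega) ?_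
    simp only [Vorbis.Off.sizeof.stb_vorbis]
    u_omega
  case check_108065 =>
    -- 0x108065, stb_vorbis_fixed.c:4313: the store of `p->eof`: inside `*p`
    have hun' : ShadowUntouched u.mem s_108065.mem := by v_untouched
    refine hlp.accSmall hsh.inv hun' _ 4 (by decide) (by u_omega) ?_
    simp only [Vorbis.Off.sizeof.stb_vorbis]
    u_omega
  case check_10807b =>
    -- 0x10807b, stb_vorbis_fixed.c:4314: the store of `p->error`: inside `*p`
    have hun' : ShadowUntouched u.mem s_10807b.mem := by v_untouched
    refine hlp.accSmall hsh.inv hun' _ 4 (by decide) (by u_omega) ?_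
    simp only [Vorbis.Off.sizeof.stb_vorbis]
    u_omega
  case check_10808e =>
    -- 0x10808e, stb_vorbis_fixed.c:4315: the store of `p->stream`: inside `*p`
    have hun' : ShadowUntouched u.mem s_10808e.mem := by v_untouched
    refine hlp.accSmall hsh.inv hun' _ 8 (by decide) (by u_omega) ?_
    simp only [Vorbis.Off.sizeof.stb_vorbis]
    u_omega
  case check_1080a2 =>
    -- 0x1080a2, stb_vorbis_fixed.c:4316: the store of `p->codebooks`: inside `*p`
    have hun' : ShadowUntouched u.mem s_1080a2.mem := by v_untouched
    refine hlp.accSmall hsh.inv hun' _ 8 (by decide) (by u_omega) ?_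
    simp only [Vorbis.Off.sizeof.stb_vorbis]
    u_omega
  case check_1080b9 =>
    -- 0x1080b9, stb_vorbis_fixed.c:4317: the store of `p->page_crc_tests`: inside `*p`
    have hun' : ShadowUntouched u.mem s_1080b9.mem := by v_untouched
    refine hlp.accSmall hsh.inv hun' _ 4 (by decide) (by u_omega) ?_
    simp only [Vorbis.Off.sizeof.stb_vorbis]
    u_omega
  -- 0x1080ce: the state after the `ret`
  refine ReachVia.done ?_
  v_returned
  -- the post: H0, the fresh arena, no store to the shadow
  have hlen32 : len < 2 ^ 32 := by
    rw [← hlen]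
    exact Mem.u32_lt _ _
  have eL : (BitVec.ofNat 32 len &&& 4294967288#32).toNat = len / 8 * 8 := by
    rw [Vorbis.Spec.vorbis_init.and_not7, BitVec.toNat_ofNat, Nat.mod_eq_of_lt hlen32]
  -- the four fields the later stores set or leave, read in the final memory
  have f112 : s_1080ce.mem.readLE (u.reg .rdi + 112) 8 = B := by
    u_frame r112
  have f120 : s_1080ce.mem.readLE (u.reg .rdi + 120) 4 = len / 8 * 8 := by
    rw [← eL, w_mem]
    u_read
  have f132 : s_1080ce.mem.readLE (u.reg .rdi + 132) 4 = len / 8 * 8 := by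
    rw [← eL, w_mem]
    u_read
  have f1792 : s_1080ce.mem.readLE (u.reg .rdi + 1792) 4 = 4294967295 := by
    rw [w_mem]
    u_read
  obtain ⟨hH0, hAF⟩ := Vorbis.Spec.vorbis_init.post_fields s_10803a.mem s_1080ce.mem (u.reg .rdi) (u.reg .rsp) B len
    _ _ _ _ _ _ _ _ hwp.1 hwp.2.1 he_room he_top hwp.2.2 hzA hzB w_mem f112 f120 f132 f1792 (Nat.le_trans (Nat.le_add_left _ _) hAR1.2.2)
  refine ⟨hH0, ?_, ?_⟩
  · -- AR1 – AR6 of the fresh arena (`ArenaOK.init`): S = 0, T = L, no block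
    exact Vorbis.ArenaOK.init B (len / 8 * 8) ⟨hAR1.1, hAR1.2.1, by omega, hAR1.2.2⟩ hAR1x hAF hout
  · -- SH8: no store went to the shadow
    v_untouched
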